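-- pv_equiv track=rewrite | github.com/Panacond/thermotechnical_calculation | string_calculation.py | sele
-- ===== SOURCE A (Python) =====
-- def sele(a):
--     l=len(a)
--     b='1234567890.'
--     c=0
--     for y in b:
--         for x in a:
--             if x==y:
--                 c=c+1
--             else:
--                 c=c
--     d=False
--     if l == c:
--         d=True
--     return(d)
-- ===== SOURCE B (Python) =====
-- def sele(a):
--     return all(x in ('1', '2', '3', '4', '5', '6', '7', '8', '9', '0', '.') for x in a)
-- ===== Notes on version B (the rewrite author's own statement) =====
-- stated objective: idiomatic
-- what changed: A counts, for each of the 11 valid characters, how many positions of the string equal it (a transposed nested double loop) and compares the total with len(a); B makes a single short-circuiting pass asking whether every character is one of the valid ones.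
import Mathlib
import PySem

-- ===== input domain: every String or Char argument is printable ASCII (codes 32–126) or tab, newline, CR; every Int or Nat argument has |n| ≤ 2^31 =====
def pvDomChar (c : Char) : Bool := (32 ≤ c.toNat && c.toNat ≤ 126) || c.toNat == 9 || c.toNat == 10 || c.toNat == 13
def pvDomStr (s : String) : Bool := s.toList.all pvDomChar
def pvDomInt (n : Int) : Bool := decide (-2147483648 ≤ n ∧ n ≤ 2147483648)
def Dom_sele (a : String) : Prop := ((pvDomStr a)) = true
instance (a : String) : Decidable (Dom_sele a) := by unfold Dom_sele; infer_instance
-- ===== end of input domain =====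

-- B replaces A's transposed count-all-matches-then-compare-to-length double loop by one short-circuiting all-characters-valid pass (idiomatic).

-- ===== PORT A =====
def sele (a : String) : Bool :=
  let l := a.toList.length
  let b := "1234567890."
  let c := b.toList.foldl
    (fun c y => a.toList.foldl (fun c x => if x = y then c + 1 else c) c) 0
  let d := false
  let d := if l = c then true else d
  d

-- ===== PORT B =====
def sele_alt (a : String) : Bool :=
  a.toList.all (fun x =>
    x ∈ ['1', '2', '3', '4', '5', '6', '7', '8', '9', '0', '.'])

-- ===== PRECONDITION & SPEC =====
def Spec_sele (a : String) (out : Bool) : Prop := out = sele_alt a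
instance (a : String) (out : Bool) : Decidable (Spec_sele a out) := by unfold Spec_sele; infer_instance

-- ===== CLAIM (what is proved, stated in full; the proofs are below) =====
def Claim_equal_sele : Prop := ∀ (a : String), Dom_sele a → Spec_sele a (sele a)

-- ===== LEMMAS AND PROOFS =====

-- the inner loop starting at accumulator c adds the number of occurrences of y
theorem sele_inner_count (y : Char) (cs : List Char) (c : Nat) :
    cs.foldl (fun c x => if x = y then c + 1 else c) c = c + cs.count y := by
  induction cs generalizing c with
  | nil => simp
  | cons x xs ih =>
      simp only [List.foldl, List.count_cons, ih]
      by_cases h : x = y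
      · simp [h]; omega
      · simp [h, beq_iff_eq]

-- counting membership in (y :: L) splits into count of y plus membership in L when y ∉ L
theorem sele_countP_cons_mem (y : Char) (L : List Char) (cs : List Char) (hy : y ∉ L) :
    cs.countP (fun x => decide (x ∈ y :: L)) =
      cs.count y + cs.countP (fun x => decide (x ∈ L)) := by
  induction cs with
  | nil => simp
  | cons x xs ih =>
      rw [List.countP_cons, List.countP_cons, List.count_cons, ih]
      by_cases h1 : x = y
      · have e1 : decide (x ∈ y :: L) = true := by simp [h1]
        have e2 : (x == y) = true := by simp [h1]
        have e3 : decide (x ∈ L) = false := by subst h1; simp [hy]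
        simp only [e1, e2, e3, Bool.false_eq_true, if_true, if_false]
        try omega
      · by_cases h2 : x ∈ L
        · have e1 : decide (x ∈ y :: L) = true := by simp [h2]
          have e2 : (x == y) = false := by simp [h1]
          have e3 : decide (x ∈ L) = true := by simp [h2]
          simp only [e1, e2, e3, Bool.false_eq_true, if_true, if_false]
          try omega
        · have e1 : decide (x ∈ y :: L) = false := by simp [h1, h2]
          have e2 : (x == y) = false := by simp [h1]
          have e3 : decide (x ∈ L) = false := by simp [h2]
          simp only [e1, e2, e3, Bool.false_eq_true, if_false]
          try omega

-- the outer loop over a duplicate-free list of characters counts the valid positions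
theorem sele_outer_count (L : List Char) (cs : List Char) (c0 : Nat) (hnd : L.Nodup) :
    L.foldl (fun c y => cs.foldl (fun c x => if x = y then c + 1 else c) c) c0 =
      c0 + cs.countP (fun x => decide (x ∈ L)) := by
  induction L generalizing c0 with
  | nil => simp
  | cons y L' ih =>
      rw [List.foldl_cons, ih _ (List.nodup_cons.mp hnd).2, sele_inner_count,
        sele_countP_cons_mem y L' cs (List.nodup_cons.mp hnd).1]
      omega

-- ===== VERDICT (by name: the statement is the Claim_ definition above) =====
theorem sele_spec : Claim_equal_sele := by
  intro a _
  unfold Spec_sele sele sele_alt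
  show (if a.toList.length =
      List.foldl (fun c y => List.foldl (fun c x => if x = y then c + 1 else c) c a.toList) 0
        (['1', '2', '3', '4', '5', '6', '7', '8', '9', '0', '.']) then true else false) =
    a.toList.all (fun x => decide (x ∈ ['1', '2', '3', '4', '5', '6', '7', '8', '9', '0', '.']))
  rw [sele_outer_count ['1', '2', '3', '4', '5', '6', '7', '8', '9', '0', '.']
      a.toList 0 (by decide), Nat.zero_add]
  by_cases hall : a.toList.all (fun x =>
      decide (x ∈ ['1', '2', '3', '4', '5', '6', '7', '8', '9', '0', '.'])) = true
  · have hcp : a.toList.countP (fun x =>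
        decide (x ∈ ['1', '2', '3', '4', '5', '6', '7', '8', '9', '0', '.'])) =
        a.toList.length := by
      rw [List.countP_eq_length]
      intro x hx
      simpa using (List.all_eq_true.mp hall) x hx
    rw [hall, hcp, if_pos rfl]
  · rw [eq_false_of_ne_true hall, if_neg]
    intro hc
    exact hall (List.all_eq_true.mpr (fun x hx => by
      simpa using (List.countP_eq_length.mp hc.symm) x hx))
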